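-- pv_equiv track=rewrite | github.com/2223-ENSEA-Stage-1A/KicadAutomatisation | Code test website and script/website working v6/myproject/myapp/views.py | treatOuput
-- ===== SOURCE A (Python) =====
-- def treatOuput(output):
--     output = output.split('\n')
--     warnings = []
--     warning = False
--     errors = []
--     error = False
--     for line in output:
--         if line.startswith("WARNING") and "W058" in line:
--             error = False
--             warnings.append(line)
--             warning = True
--         elif warning and line.strip().startswith("@"):
--             warnings[-1] = warnings[-1] + line
--         elif line.startswith("ERROR"):
--             warning = False
--             errors.append(line)
--             error = True
--         elif error and line.strip().startswith("@"):
--             errors[-1] = errors[-1] + line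
--         else:
--             error = False
--             warning = False
--
--     return "List of Warnings <br>" + '\n'.join(warnings) + "\n\nList of Errors <br>" + '\n'.join(errors)
-- ===== SOURCE B (Python) =====
-- def treatOuput(output):
--     lines = output.split('\n')
--     warnings = []
--     errors = []
--     i = 0
--     n = len(lines)
--     while i < n:
--         line = lines[i]
--         if line.startswith("WARNING") and "W058" in line:
--             i += 1
--             while i < n and lines[i].strip().startswith("@"):
--                 line += lines[i]
--                 i += 1
--             warnings.append(line)
--         elif line.startswith("ERROR"):
--             i += 1
--             while i < n and lines[i].strip().startswith("@"):
--                 line += lines[i]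
--                 i += 1
--             errors.append(line)
--         else:
--             i += 1
--     return "List of Warnings <br>" + '\n'.join(warnings) + "\n\nList of Errors <br>" + '\n'.join(errors)
-- ===== Notes on version B (the rewrite author's own statement) =====
-- stated objective: alternative
-- what changed: Replaced the single fold that carries two boolean block-state flags by a nested scan: an outer loop over the lines that, on each warning or error header, runs an inner loop greedily consuming the following continuation lines and appends the completed block once, so no flag state and no last-element mutation is needed.
import Mathlib
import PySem

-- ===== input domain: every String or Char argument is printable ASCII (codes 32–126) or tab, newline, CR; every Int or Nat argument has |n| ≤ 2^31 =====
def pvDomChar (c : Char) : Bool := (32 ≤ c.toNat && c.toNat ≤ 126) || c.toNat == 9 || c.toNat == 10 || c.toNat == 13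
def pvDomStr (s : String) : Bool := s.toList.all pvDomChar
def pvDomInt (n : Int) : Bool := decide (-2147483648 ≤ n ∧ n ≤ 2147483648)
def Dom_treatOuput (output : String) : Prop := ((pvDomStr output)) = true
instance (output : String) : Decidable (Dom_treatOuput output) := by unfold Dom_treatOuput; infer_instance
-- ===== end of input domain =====

-- B replaces A's two boolean state flags by a nested scan that, on each header line,
-- greedily consumes its continuation lines in an inner loop (same return value; objective: alternative decomposition).

-- shared line predicates (the same Python tests appear verbatim in A and B)
def pvIsWH (l : String) : Bool := PySem.Str.startswith l "WARNING" && PySem.Str.isIn "W058" l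
def pvIsEH (l : String) : Bool := PySem.Str.startswith l "ERROR"
def pvIsCont (l : String) : Bool := PySem.Str.startswith (PySem.Str.strip l) "@"

-- ===== PORT A =====
-- xs[-1] = xs[-1] + line  (A only reaches it when the list is nonempty)
def pvModLast (xs : List String) (line : String) : List String :=
  match xs with
  | [] => []
  | [x] => [x ++ line]
  | x :: y :: rest => x :: pvModLast (y :: rest) line

def pvStepA (st : List String × Bool × List String × Bool) (line : String) :
    List String × Bool × List String × Bool :=
  let (warnings, warning, errors, error) := st
  if pvIsWH line then (warnings ++ [line], true, errors, false)
  else if warning && pvIsCont line then (pvModLast warnings line, warning, errors, error)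
  else if pvIsEH line then (warnings, false, errors ++ [line], true)
  else if error && pvIsCont line then (warnings, warning, pvModLast errors line, error)
  else (warnings, false, errors, false)

def treatOuput (output : String) : String :=
  "List of Warnings <br>"
    ++ PySem.Str.join "\n"
      (List.foldl pvStepA ([], false, [], false) ((PySem.Str.split? output "\n").getD [])).1
    ++ "\n\nList of Errors <br>"
    ++ PySem.Str.join "\n"
      (List.foldl pvStepA ([], false, [], false) ((PySem.Str.split? output "\n").getD [])).2.2.1

-- ===== PORT B =====
-- inner while: concatenate the following continuation lines onto cur, return the rest
def pvConsume : List String → String → String × List String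
  | [], cur => (cur, [])
  | l :: ls, cur => if pvIsCont l then pvConsume ls (cur ++ l) else (cur, l :: ls)

theorem pvConsume_len (ls : List String) (cur : String) :
    (pvConsume ls cur).2.length ≤ ls.length := by
  induction ls generalizing cur with
  | nil => simp [pvConsume]
  | cons l t ih =>
    simp only [pvConsume]
    split
    · exact le_trans (ih _) (Nat.le_succ _)
    · simp

-- outer while over the remaining lines
def pvGo : List String → List String × List String
  | [] => ([], [])
  | l :: rest =>
    if pvIsWH l then
      let p := pvConsume rest l
      let q := pvGo p.2
      (p.1 :: q.1, q.2)
    else if pvIsEH l then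
      let p := pvConsume rest l
      let q := pvGo p.2
      (q.1, p.1 :: q.2)
    else pvGo rest
termination_by ls => ls.length
decreasing_by
  · exact Nat.lt_succ_of_le (pvConsume_len rest l)
  · exact Nat.lt_succ_of_le (pvConsume_len rest l)
  · simp

def treatOuput_alt (output : String) : String :=
  "List of Warnings <br>"
    ++ PySem.Str.join "\n" (pvGo ((PySem.Str.split? output "\n").getD [])).1
    ++ "\n\nList of Errors <br>"
    ++ PySem.Str.join "\n" (pvGo ((PySem.Str.split? output "\n").getD [])).2

-- ===== PRECONDITION & SPEC =====
def Spec_treatOuput (output : String) (out : String) : Prop := out = treatOuput_alt output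
instance (output : String) (out : String) : Decidable (Spec_treatOuput output out) := by
  unfold Spec_treatOuput; infer_instance

-- ===== CLAIM (what is proved, stated in full; the proofs are below) =====
def Claim_equal_treatOuput : Prop :=
  ∀ (output : String), Dom_treatOuput output → Spec_treatOuput output (treatOuput output)

-- ===== LEMMAS AND PROOFS =====

-- a line whose first char is non-space and not the continuation marker is not a continuation line
theorem pv_not_cont {l : String} {c : Char} {cs : List Char}
    (h : l.toList = c :: cs) (hsp : PySem.Chars.isspace c = false) (hne : c ≠ '@') :
    pvIsCont l = false := by
  have hstrip : ∃ t, PySem.Chars.strip (c :: cs) = c :: t := by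
    simp only [PySem.Chars.strip, PySem.Chars.lstrip, List.dropWhile_cons, hsp,
      Bool.false_eq_true, ite_false, PySem.Chars.rstrip, List.reverse_cons,
      List.dropWhile_append]
    split
    · refine ⟨[], ?_⟩
      simp
    · refine ⟨(List.dropWhile PySem.Chars.isspace cs.reverse).reverse, ?_⟩
      rw [List.reverse_append]
      rfl
  obtain ⟨t, ht⟩ := hstrip
  simp only [pvIsCont, PySem.Str.startswith_eq, PySem.Str.toList_strip, h, ht]
  simp [PySem.Chars.startswith, List.isPrefixOf]
  intro hc
  exact absurd hc.symm hne

theorem pvWH_not_cont {l : String} (h : pvIsWH l = true) : pvIsCont l = false := by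
  have hsw : PySem.Str.startswith l "WARNING" = true := by
    simp only [pvIsWH, Bool.and_eq_true] at h; exact h.1
  rw [PySem.Str.startswith_eq] at hsw
  rw [PySem.Chars.startswith_iff] at hsw
  obtain ⟨r, hr⟩ := hsw
  exact pv_not_cont (c := 'W') (cs := "ARNING".toList ++ r)
    (by rw [← hr]; rfl) (by decide) (by decide)

theorem pvEH_not_cont {l : String} (h : pvIsEH l = true) : pvIsCont l = false := by
  rw [pvIsEH, PySem.Str.startswith_eq, PySem.Chars.startswith_iff] at h
  obtain ⟨r, hr⟩ := h
  exact pv_not_cont (c := 'E') (cs := "RROR".toList ++ r)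
    (by rw [← hr]; rfl) (by decide) (by decide)

theorem pvCont_not_WH {l : String} (h : pvIsCont l = true) : pvIsWH l = false := by
  by_contra hc
  have := pvWH_not_cont (l := l) (by revert hc; cases pvIsWH l <;> simp)
  rw [h] at this; cases this

theorem pvCont_not_EH {l : String} (h : pvIsCont l = true) : pvIsEH l = false := by
  by_contra hc
  have := pvEH_not_cont (l := l) (by revert hc; cases pvIsEH l <;> simp)
  rw [h] at this; cases this

theorem pvModLast_append (ws : List String) (x s : String) :
    pvModLast (ws ++ [x]) s = ws ++ [x ++ s] := by
  induction ws with
  | nil => rfl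
  | cons a t ih =>
    cases t with
    | nil => simp [pvModLast]
    | cons b u => simp only [List.cons_append, pvModLast] at ih ⊢; rw [ih]

-- the tail pvConsume leaves behind starts with a non-continuation line (or is empty)
theorem pvConsume_rest (ls : List String) (cur : String) :
    (pvConsume ls cur).2 = [] ∨
      ∃ h t, (pvConsume ls cur).2 = h :: t ∧ pvIsCont h = false := by
  induction ls generalizing cur with
  | nil => left; rfl
  | cons l t ih =>
    simp only [pvConsume]
    by_cases hc : pvIsCont l = true
    · simp only [hc, ite_true]; exact ih _
    · simp only [hc]
      exact Or.inr ⟨l, t, rfl, by revert hc; cases pvIsCont l <;> simp⟩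

-- A's loop while the warning flag is set: it performs exactly pvConsume
theorem pv_warmW (lines : List String) (cur : String) (ws es : List String) :
    List.foldl pvStepA (ws ++ [cur], true, es, false) lines
      = List.foldl pvStepA (ws ++ [(pvConsume lines cur).1], true, es, false)
          (pvConsume lines cur).2 := by
  induction lines generalizing cur with
  | nil => rfl
  | cons l t ih =>
    by_cases hc : pvIsCont l = true
    · have hw := pvCont_not_WH hc
      simp only [List.foldl_cons, pvStepA, hw, Bool.false_eq_true, ite_false, Bool.true_and,
        hc, ite_true, pvModLast_append, pvConsume]
      exact ih (cur ++ l)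
    · simp [pvConsume, hc]

-- A's loop while the error flag is set: it performs exactly pvConsume
theorem pv_warmE (lines : List String) (cur : String) (ws es : List String) :
    List.foldl pvStepA (ws, false, es ++ [cur], true) lines
      = List.foldl pvStepA (ws, false, es ++ [(pvConsume lines cur).1], true)
          (pvConsume lines cur).2 := by
  induction lines generalizing cur with
  | nil => rfl
  | cons l t ih =>
    by_cases hc : pvIsCont l = true
    · have hw := pvCont_not_WH hc
      have he := pvCont_not_EH hc
      simp only [List.foldl_cons, pvStepA, hw, Bool.false_eq_true, ite_false, Bool.false_and,
        he, hc, Bool.true_and, ite_true, pvModLast_append, pvConsume]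
      exact ih (cur ++ l)
    · simp [pvConsume, hc]

-- when the next line is not a continuation, the warning/error flag is irrelevant
theorem pv_step_cold {l : String} (hc : pvIsCont l = false) (ws es : List String)
    (w e : Bool) :
    pvStepA (ws, w, es, e) l = pvStepA (ws, false, es, false) l := by
  simp [pvStepA, hc]

theorem pv_defrost (rest : List String)
    (hr : rest = [] ∨ ∃ h t, rest = h :: t ∧ pvIsCont h = false)
    (ws es : List String) (w e : Bool) :
    ((List.foldl pvStepA (ws, w, es, e) rest).1
        = (List.foldl pvStepA (ws, false, es, false) rest).1)
    ∧ ((List.foldl pvStepA (ws, w, es, e) rest).2.2.1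
        = (List.foldl pvStepA (ws, false, es, false) rest).2.2.1) := by
  rcases hr with h | ⟨h, t, rfl, hc⟩
  · subst h; simp
  · rw [List.foldl_cons, List.foldl_cons, pv_step_cold hc]
    exact ⟨rfl, rfl⟩

-- main invariant: A's fold from a cold state produces exactly pvGo's two lists, appended
theorem pv_main : ∀ (n : Nat) (lines : List String), lines.length ≤ n →
    ∀ (ws es : List String),
    ((List.foldl pvStepA (ws, false, es, false) lines).1 = ws ++ (pvGo lines).1)
    ∧ ((List.foldl pvStepA (ws, false, es, false) lines).2.2.1 = es ++ (pvGo lines).2) := by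
  intro n
  induction n with
  | zero =>
    intro lines hl ws es
    have : lines = [] := List.length_eq_zero_iff.mp (Nat.le_zero.mp hl)
    subst this
    simp [pvGo]
  | succ n ih =>
    intro lines hl ws es
    cases lines with
    | nil => simp [pvGo]
    | cons l rest =>
      have hrest : rest.length ≤ n := by simpa using Nat.succ_le_succ_iff.mp hl
      by_cases hW : pvIsWH l = true
      · have h1 : List.foldl pvStepA (ws, false, es, false) (l :: rest)
            = List.foldl pvStepA (ws ++ [l], true, es, false) rest := by
          simp [pvStepA, hW]
        rw [h1, pv_warmW]
        have hlen : (pvConsume rest l).2.length ≤ n :=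
          le_trans (pvConsume_len rest l) hrest
        have hd := pv_defrost (pvConsume rest l).2 (pvConsume_rest rest l)
          (ws ++ [(pvConsume rest l).1]) es true false
        have hm := ih (pvConsume rest l).2 hlen (ws ++ [(pvConsume rest l).1]) es
        rw [pvGo]
        simp only [hW, if_pos]
        exact ⟨by rw [hd.1, hm.1]; simp, by rw [hd.2, hm.2]⟩
      · by_cases hE : pvIsEH l = true
        · have h1 : List.foldl pvStepA (ws, false, es, false) (l :: rest)
              = List.foldl pvStepA (ws, false, es ++ [l], true) rest := by
            simp [pvStepA, hW, hE]
          rw [h1, pv_warmE]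
          have hlen : (pvConsume rest l).2.length ≤ n :=
            le_trans (pvConsume_len rest l) hrest
          have hd := pv_defrost (pvConsume rest l).2 (pvConsume_rest rest l)
            ws (es ++ [(pvConsume rest l).1]) false true
          have hm := ih (pvConsume rest l).2 hlen ws (es ++ [(pvConsume rest l).1])
          rw [pvGo]
          simp only [hW, hE, Bool.false_eq_true, if_neg, if_pos,
            not_false_eq_true]
          exact ⟨by rw [hd.1, hm.1], by rw [hd.2, hm.2]; simp⟩
        · have h1 : pvStepA (ws, false, es, false) l = (ws, false, es, false) := by
            simp [pvStepA, hW, hE]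
          have hm := ih rest hrest ws es
          rw [pvGo]
          simp only [hW, hE, Bool.false_eq_true, if_neg, not_false_eq_true, List.foldl_cons, h1]
          exact hm

-- ===== VERDICT (by name: the statement is the Claim_ definition above) =====
theorem treatOuput_spec : Claim_equal_treatOuput := by
  intro output _
  unfold Spec_treatOuput treatOuput treatOuput_alt
  have hm := pv_main ((PySem.Str.split? output "\n").getD []).length
    ((PySem.Str.split? output "\n").getD []) le_rfl [] []
  simp only [List.nil_append] at hm
  rw [hm.1, hm.2]
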